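-- pv_equiv track=rewrite | github.com/harmannd/Codewars | StringTops/string_tops.py | tops
-- ===== SOURCE A (Python) =====
-- def tops(msg):
--     str = ""
--     x = y = 1
--     while x < len(msg):
--         str += msg[x]
--         y += 4
--         x += y
--     return str[::-1]
-- ===== SOURCE B (Python) =====
-- def tops(msg):
--     n = len(msg)
--     k = 1
--     while k * (2 * k - 1) < n:
--         k += 1
--     return ''.join(msg[j * (2 * j - 1)] for j in range(1, k))[::-1]
-- ===== Notes on version B (the rewrite author's own statement) =====
-- stated objective: alternative
-- what changed: B replaces A's incremental x/y accumulator loop that appends char by char with a closed form: the visited indices are the hexagonal numbers k*(2k-1), so B computes the bound k, gathers the characters with a comprehension over that formula and reverses once with a slice.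
import Mathlib
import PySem

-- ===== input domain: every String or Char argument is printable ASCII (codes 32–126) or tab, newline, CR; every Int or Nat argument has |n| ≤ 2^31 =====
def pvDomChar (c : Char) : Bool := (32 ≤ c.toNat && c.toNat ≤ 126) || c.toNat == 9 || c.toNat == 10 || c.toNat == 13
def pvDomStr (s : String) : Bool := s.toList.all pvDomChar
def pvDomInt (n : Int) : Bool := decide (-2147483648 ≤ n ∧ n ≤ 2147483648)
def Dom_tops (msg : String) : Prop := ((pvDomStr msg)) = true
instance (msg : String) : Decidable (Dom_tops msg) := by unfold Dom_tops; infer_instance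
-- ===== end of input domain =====

-- B replaces A's incremental x/y accumulator loop with the closed form k*(2k-1) for the
-- visited indices: find the bound k, map the formula over range(1,k), reverse once.

-- ===== PORT A =====
-- A's while loop: x, y stay positive integers throughout, modelled as Nat loop state.
-- msg[x] is always in range here (0 ≤ x < len inside the loop), ported as getD.
def topsLoopA (chars : List Char) (x y : Nat) (acc : List Char) : List Char :=
  if x < chars.length then
    topsLoopA chars (x + (y + 4)) (y + 4) (acc ++ [chars.getD x ' '])
  else acc
termination_by chars.length - x
decreasing_by omega

def tops (msg : String) : String :=
  ((topsLoopA msg.toList 1 1 []).reverse).asString   -- str[::-1]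

-- ===== PORT B =====
-- B's bound-finding while loop
def kLoop (n k : Nat) : Nat :=
  if k * (2 * k - 1) < n then kLoop n (k + 1) else k
termination_by n - k
decreasing_by
  cases k with
  | zero => simpa using by omega
  | succ m =>
      have h : m + 1 ≤ (m + 1) * (2 * (m + 1) - 1) :=
        Nat.le_mul_of_pos_right _ (by omega)
      omega

-- ''.join(msg[j*(2*j-1)] for j in range(1, k))[::-1]
def tops_alt (msg : String) : String :=
  let chars := msg.toList
  let k := kLoop chars.length 1
  ((((List.range' 1 (k - 1)).map (fun j => chars.getD (j * (2 * j - 1)) ' ')).reverse)).asString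

-- ===== PRECONDITION & SPEC =====
def Spec_tops (msg : String) (out : String) : Prop := out = tops_alt msg
instance (msg : String) (out : String) : Decidable (Spec_tops msg out) := by unfold Spec_tops; infer_instance

-- ===== CLAIM (what is proved, stated in full; the proofs are below) =====
def Claim_equal_tops : Prop := ∀ (msg : String), Dom_tops msg → Spec_tops msg (tops msg)

-- ===== LEMMAS AND PROOFS =====

theorem kLoop_ge (n : Nat) : ∀ f k, n - k ≤ f → k ≤ kLoop n k := by
  intro f
  induction f with
  | zero =>
    intro k hk
    rw [kLoop]
    split
    · rename_i h
      cases k with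
      | zero => omega
      | succ m =>
        have : m + 1 ≤ (m + 1) * (2 * (m + 1) - 1) := Nat.le_mul_of_pos_right _ (by omega)
        omega
    · omega
  | succ f ih =>
    intro k hk
    rw [kLoop]
    split
    · rename_i h
      have hk1 : k < n := by
        cases k with
        | zero => omega
        | succ m =>
          have : m + 1 ≤ (m + 1) * (2 * (m + 1) - 1) := Nat.le_mul_of_pos_right _ (by omega)
          omega
      have := ih (k + 1) (by omega)
      omega
    · omega

theorem loop_eq (chars : List Char) :
    ∀ f k acc, chars.length - k ≤ f → 1 ≤ k →
      topsLoopA chars (k * (2 * k - 1)) (4 * (k - 1) + 1) acc =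
        acc ++ (List.range' k (kLoop chars.length k - k)).map
          (fun j => chars.getD (j * (2 * j - 1)) ' ') := by
  have step : ∀ k acc, 1 ≤ k →
      (∀ acc', topsLoopA chars ((k + 1) * (2 * (k + 1) - 1)) (4 * (k + 1 - 1) + 1) acc' =
        acc' ++ (List.range' (k + 1) (kLoop chars.length (k + 1) - (k + 1))).map
          (fun j => chars.getD (j * (2 * j - 1)) ' ')) →
      topsLoopA chars (k * (2 * k - 1)) (4 * (k - 1) + 1) acc =
        acc ++ (List.range' k (kLoop chars.length k - k)).map
          (fun j => chars.getD (j * (2 * j - 1)) ' ') := by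
    intro k acc hk ihnext
    obtain ⟨m, rfl⟩ : ∃ m, k = m + 1 := ⟨k - 1, by omega⟩
    rw [topsLoopA, kLoop]
    by_cases h : (m + 1) * (2 * (m + 1) - 1) < chars.length
    · simp only [h, if_pos]
      have hx : (m + 1) * (2 * (m + 1) - 1) + (4 * (m + 1 - 1) + 1 + 4)
          = (m + 2) * (2 * (m + 2) - 1) := by
        have e1 : 2 * (m + 1) - 1 = 2 * m + 1 := by omega
        have e2 : 2 * (m + 2) - 1 = 2 * m + 3 := by omega
        have e3 : m + 1 - 1 = m := rfl
        rw [e1, e2, e3]; ring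
      have hy : 4 * (m + 1 - 1) + 1 + 4 = 4 * (m + 2 - 1) + 1 := by omega
      rw [hx, hy, ihnext (acc ++ [chars.getD ((m + 1) * (2 * (m + 1) - 1)) ' '])]
      have hK := kLoop_ge chars.length (chars.length) (m + 2) (by omega)
      have hrange : kLoop chars.length (m + 2) - (m + 1)
          = (kLoop chars.length (m + 2) - (m + 2)) + 1 := by omega
      rw [hrange, List.range'_succ, List.map_cons, List.append_assoc]
      rfl
    · simp only [h, if_neg, not_false_iff]
      simp
  intro f
  induction f with
  | zero =>
    intro k acc hf hk
    -- chars.length ≤ k, so both the A-loop and kLoop stop immediately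
    have hkn : ¬ k * (2 * k - 1) < chars.length := by
      obtain ⟨m, rfl⟩ : ∃ m, k = m + 1 := ⟨k - 1, by omega⟩
      have : m + 1 ≤ (m + 1) * (2 * (m + 1) - 1) := Nat.le_mul_of_pos_right _ (by omega)
      omega
    rw [topsLoopA, kLoop]
    simp only [hkn, if_neg, not_false_iff]
    simp
  | succ f ih =>
    intro k acc hf hk
    exact step k acc hk (fun acc' => ih (k + 1) acc' (by omega) (by omega))

theorem tops_eq_alt (msg : String) : tops msg = tops_alt msg := by
  unfold tops
  have h := loop_eq msg.toList msg.toList.length 1 [] (by omega) (by omega)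
  norm_num at h
  rw [h]
  simp [tops_alt]

-- ===== VERDICT (by name: the statement is the Claim_ definition above) =====
theorem tops_spec : Claim_equal_tops := by
  intro msg _
  exact tops_eq_alt msg
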